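-- pv_equiv track=rewrite | github.com/Jdoublee/CodingTestPractice | programmers/Level4/자동완성.py | solution
-- ===== SOURCE A (Python) =====
-- def check(a,b): # a 기준으로 주변 문자열과 동일한 앞부분 찾아주는 함수
--     res = ''
--     i = -1
--     flag = True
--
--     for x,y in zip(a,b):
--         i += 1
--         res += x
--         if x != y:
--             flag = False
--             break
--
--     if flag and len(a) > len(b) and len(b) == i+1: # 겹치는 앞부분 다음 문자 추가
--         res += a[i+1]
--
--     return res
--
-- def solution(words):
--     answer = 0
--
--     words.sort() # 정렬 후 앞 뒤 문자열과 비교 진행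
--
--     for i in range(len(words)):
--         if i == 0:
--             answer += len(check(words[i],words[i+1]))
--         elif i == len(words)-1:
--             answer += len(check(words[i],words[i-1]))
--         else:
--             first = len(check(words[i],words[i-1]))
--             second = len(check(words[i],words[i+1]))
--             answer += max(first,second)
--
--     return answer
-- ===== SOURCE B (Python) =====
-- def solution(words):
--     # Prefix-count table (a trie collapsed into one hash map): no sorting needed.
--     cnt = {}
--     for w in words:
--         p = ''
--         for ch in w:
--             p += ch
--             cnt[p] = cnt.get(p, 0) + 1
--     total = 0
--     for w in words:
--         typed = len(w)
--         p = ''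
--         for d, ch in enumerate(w, 1):
--             p += ch
--             if cnt[p] == 1:
--                 typed = d
--                 break
--         total += typed
--     return total
-- ===== Notes on version B (the rewrite author's own statement) =====
-- stated objective: alternative
-- what changed: Replaces sort-then-compare-with-both-neighbours (string-building helper per pair) by a single prefix-count hash table (a collapsed trie): each word's answer is the first prefix depth whose count is 1, no sorting at all.
import Mathlib
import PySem

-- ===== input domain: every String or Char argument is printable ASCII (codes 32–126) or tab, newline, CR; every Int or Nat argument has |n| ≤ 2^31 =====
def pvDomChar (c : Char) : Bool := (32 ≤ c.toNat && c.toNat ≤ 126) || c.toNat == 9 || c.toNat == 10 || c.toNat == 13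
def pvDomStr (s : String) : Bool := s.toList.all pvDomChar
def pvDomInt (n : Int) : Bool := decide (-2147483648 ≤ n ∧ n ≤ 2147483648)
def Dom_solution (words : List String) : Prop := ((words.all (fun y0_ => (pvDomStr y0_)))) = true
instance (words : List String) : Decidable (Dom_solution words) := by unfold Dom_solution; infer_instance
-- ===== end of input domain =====

-- B replaces sort-then-compare-with-neighbours by a prefix-count table (a collapsed trie); equivalence is
-- about the RETURN value only: A sorts its argument in place, B does not mutate it.

-- ===== PORT A =====
-- the loop of check: walks zip(a,b) carrying (res, i, flag), breaking at the first mismatch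
def checkGo : List (Char × Char) → List Char → Int → Bool → List Char × Int × Bool
  | [], res, i, flag => (res, i, flag)
  | (x, y) :: rest, res, i, flag =>
    let i := i + 1
    let res := res ++ [x]
    if x ≠ y then (res, i, false) else checkGo rest res i flag

def checkA (a b : String) : List Char :=
  let t := checkGo (a.toList.zip b.toList) [] (-1) true
  let res := t.1
  let i := t.2.1
  let flag := t.2.2
  if flag && decide ((PySem.Str.len b : Int) < (PySem.Str.len a : Int))
          && ((PySem.Str.len b : Int) == i + 1) then
    -- res += a[i+1]; in this branch i+1 < len(a), so pyGet? is some (none is unreachable)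
    match PySem.List.pyGet? a.toList (i + 1) with
    | some c => res ++ [c]
    | none => res
  else res

def solution (words : List String) : Int :=
  let answer : Int := 0
  let ws := PySem.List.sorted words (fun x => x) false   -- words.sort()
  (PySem.List.pyRange 0 (ws.length : Int) 1).foldl (fun answer i =>
    if i == 0 then
      answer + ((checkA (PySem.List.pyGetD ws i "") (PySem.List.pyGetD ws (i + 1) "")).length : Int)
    else if i == (ws.length : Int) - 1 then
      answer + ((checkA (PySem.List.pyGetD ws i "") (PySem.List.pyGetD ws (i - 1) "")).length : Int)
    else
      let first : Int := ((checkA (PySem.List.pyGetD ws i "") (PySem.List.pyGetD ws (i - 1) "")).length : Int)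
      let second : Int := ((checkA (PySem.List.pyGetD ws i "") (PySem.List.pyGetD ws (i + 1) "")).length : Int)
      answer + max first second) answer

-- ===== PORT B =====
-- one step of the counting loop: p += ch; cnt[p] = cnt.get(p, 0) + 1
def cntStep (st : PySem.Dict (List Char) Int × List Char) (ch : Char) :
    PySem.Dict (List Char) Int × List Char :=
  let p := st.2 ++ [ch]
  (st.1.insert p (st.1.getD p 0 + 1), p)

def cntB (words : List String) : PySem.Dict (List Char) Int :=
  words.foldl (fun cnt w => (w.toList.foldl cntStep (cnt, [])).1) PySem.Dict.empty

-- the per-word scan: first depth d with cnt[p] == 1, else len(w)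
def needGo (cnt : PySem.Dict (List Char) Int) (lw : Int) :
    List Char → List Char → Int → Int
  | [], _, _ => lw
  | ch :: rest, p, d =>
    let p' := p ++ [ch]
    if cnt.getD p' 0 == 1 then d + 1 else needGo cnt lw rest p' (d + 1)

def solution_alt (words : List String) : Int :=
  let cnt := cntB words
  words.foldl (fun total w => total + needGo cnt (PySem.Str.len w : Int) w.toList [] 0) 0

-- ===== PRECONDITION & SPEC =====
-- Pre_ excludes exactly the one-element lists: there A indexes words[i+1] past the end and raises IndexError.
def Pre_solution (words : List String) : Prop := words.length ≠ 1
instance (words : List String) : Decidable (Pre_solution words) := by unfold Pre_solution; infer_instance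
def pvWitness_solution : List String := ["go", "gone", "guild"]

def Spec_solution (words : List String) (out : Int) : Prop := out = solution_alt words
instance (words : List String) (out : Int) : Decidable (Spec_solution words out) := by unfold Spec_solution; infer_instance

-- ===== CLAIM (what is proved, stated in full; the proofs are below) =====
def Claim_equal_solution : Prop := ∀ (words : List String), Dom_solution words → Pre_solution words → Spec_solution words (solution words)

-- ===== LEMMAS AND PROOFS =====
def lcp : List Char → List Char → Nat
  | x :: xs, y :: ys => if x = y then lcp xs ys + 1 else 0
  | _, _ => 0

theorem lcp_le_left (a b : List Char) : lcp a b ≤ a.length := by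
  induction a generalizing b with
  | nil => simp [lcp]
  | cons x xs ih =>
    cases b with
    | nil => simp [lcp]
    | cons y ys =>
      simp only [lcp, List.length_cons]
      split
      · exact Nat.succ_le_succ (ih ys)
      · omega

theorem lcp_comm (a b : List Char) : lcp a b = lcp b a := by
  induction a generalizing b with
  | nil => cases b <;> simp [lcp]
  | cons x xs ih =>
    cases b with
    | nil => simp [lcp]
    | cons y ys =>
      simp only [lcp]
      by_cases h : x = y
      · subst h; simp [ih]
      · rw [if_neg h, if_neg (fun h' : y = x => h h'.symm)]

theorem lcp_le_right (a b : List Char) : lcp a b ≤ b.length := by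
  rw [lcp_comm]; exact lcp_le_left b a

theorem le_lcp_iff (a b : List Char) (d : Nat) :
    d ≤ lcp a b ↔ d ≤ a.length ∧ d ≤ b.length ∧ a.take d = b.take d := by
  induction d generalizing a b with
  | zero => simp
  | succ d ih =>
    cases a with
    | nil => simp [lcp]
    | cons x xs =>
      cases b with
      | nil => simp [lcp]
      | cons y ys =>
        simp only [lcp, List.length_cons, List.take_succ_cons]
        by_cases h : x = y
        · subst h
          rw [if_pos rfl]
          simp only [Nat.succ_le_succ_iff, ih, List.cons.injEq, true_and]
        · rw [if_neg h]
          simp only [Nat.succ_le_succ_iff, List.cons.injEq]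
          constructor
          · omega
          · rintro ⟨_, _, hxy, _⟩; exact absurd hxy h

theorem lcp_take_eq (a b : List Char) : a.take (lcp a b) = b.take (lcp a b) :=
  ((le_lcp_iff a b (lcp a b)).mp le_rfl).2.2

theorem prefix_iff_le_lcp (w u : List Char) (d : Nat) (hd : d ≤ w.length) :
    w.take d <+: u ↔ d ≤ lcp w u := by
  rw [le_lcp_iff]
  constructor
  · intro h
    have hlen : (w.take d).length = d := by simp [hd]
    have hle : d ≤ u.length := by simpa [hlen] using h.length_le
    have := List.prefix_iff_eq_take.mp h
    rw [hlen] at this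
    exact ⟨hd, hle, this⟩
  · rintro ⟨h1, h2, h3⟩
    rw [h3]
    exact List.take_prefix d u

theorem cons_le_cases (x y : Char) (as bs : List Char) (h : (x :: as : List Char) ≤ y :: bs) :
    x < y ∨ (x = y ∧ as ≤ bs) := by
  rcases lt_or_eq_of_le h with h | h
  · rcases List.cons_lt_cons_iff.mp h with h | h
    · exact Or.inl h
    · exact Or.inr ⟨h.1, le_of_lt h.2⟩
  · injection h with h1 h2; exact Or.inr ⟨h1, le_of_eq h2⟩

theorem le_nil_eq_nil (a : List Char) (h : a ≤ []) : a = [] := by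
  rcases lt_or_eq_of_le h with h | h
  · cases (List.lt_iff_lex_lt a [] |>.mp h)
  · exact h

theorem lex_sandwich (d : Nat) : ∀ (a b c : List Char), a ≤ b → b ≤ c →
    d ≤ a.length → d ≤ c.length → a.take d = c.take d → b.take d = a.take d := by
  induction d with
  | zero => intro a b c _ _ _ _ _; simp
  | succ d ih =>
    intro a b c hab hbc hda hdc htake
    cases a with
    | nil => simp at hda
    | cons x as =>
      cases c with
      | nil => simp at hdc
      | cons z cs =>
        simp only [List.take_succ_cons, List.cons.injEq] at htake
        obtain ⟨hxz, htk⟩ := htake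
        subst hxz
        cases b with
        | nil => exact absurd (le_nil_eq_nil _ hab) (by simp)
        | cons y bs =>
          rcases cons_le_cases _ _ _ _ hab with h1 | ⟨h1, h1t⟩
          · rcases cons_le_cases _ _ _ _ hbc with h2 | ⟨h2, _⟩
            · exact absurd (lt_trans h1 h2) (lt_irrefl _)
            · exact absurd (h2 ▸ h1) (lt_irrefl _)
          · subst h1
            rcases cons_le_cases _ _ _ _ hbc with h2 | ⟨_, h2t⟩
            · exact absurd h2 (lt_irrefl _)
            · simp only [List.take_succ_cons, List.cons.injEq, true_and]
              exact ih as bs cs h1t h2t (by simpa using hda) (by simpa using hdc) htk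

theorem lcp_between_left (a m w : List Char) (h1 : a ≤ m) (h2 : m ≤ w) :
    lcp w a ≤ lcp w m := by
  set d := lcp w a with hd
  have h3 : w.take d = a.take d := lcp_take_eq w a
  have hdw : d ≤ w.length := lcp_le_left w a
  have hda : d ≤ a.length := lcp_le_right w a
  have hm : m.take d = a.take d := lex_sandwich d a m w h1 h2 hda hdw h3.symm
  rw [le_lcp_iff]
  have hlen : d ≤ m.length := by
    have : (m.take d).length = (a.take d).length := by rw [hm]
    simp [Nat.min_eq_left hda] at this
    omega
  exact ⟨hdw, hlen, by rw [h3, hm]⟩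

theorem lcp_between_right (w m u : List Char) (h1 : w ≤ m) (h2 : m ≤ u) :
    lcp w u ≤ lcp w m := by
  set d := lcp w u with hd
  have h3 : w.take d = u.take d := lcp_take_eq w u
  have hdw : d ≤ w.length := lcp_le_left w u
  have hdu : d ≤ u.length := lcp_le_right w u
  have hm : m.take d = w.take d := lex_sandwich d w m u h1 h2 hdw hdu h3
  rw [le_lcp_iff]
  have hlen : d ≤ m.length := by
    have : (m.take d).length = (w.take d).length := by rw [hm]
    simp [Nat.min_eq_left hdw] at this
    omega
  exact ⟨hdw, hlen, hm.symm⟩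

theorem checkGo_spec (a : List Char) : ∀ (b res : List Char) (i : Int),
    checkGo (a.zip b) res i true =
      if lcp a b < min a.length b.length then
        (res ++ a.take (lcp a b + 1), i + (lcp a b : Nat) + 1, false)
      else (res ++ a.take (min a.length b.length), i + ((min a.length b.length : Nat) : Int), true) := by
  induction a with
  | nil => intro b res i; simp [checkGo, lcp]
  | cons x as ih =>
    intro b res i
    cases b with
    | nil =>
      simp [checkGo, lcp]
    | cons y bs =>
      by_cases h : x = y
      · subst h
        have hl : lcp (x :: as) (x :: bs) = lcp as bs + 1 := by simp [lcp]
        rw [List.zip_cons_cons]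
        simp only [checkGo, if_neg (by simp : ¬ x ≠ x)]
        rw [ih bs (res ++ [x]) (i + 1), hl]
        simp only [List.length_cons, List.take_succ_cons]
        have hmin : min (as.length + 1) (bs.length + 1) = min as.length bs.length + 1 := by omega
        rw [hmin]
        by_cases hlt : lcp as bs < min as.length bs.length
        · rw [if_pos hlt, if_pos (by omega)]
          exact Prod.ext (by simp) (Prod.ext (by push_cast; ring) rfl)
        · rw [if_neg hlt, if_neg (by omega)]
          exact Prod.ext (by simp) (Prod.ext (by push_cast; ring) rfl)
      · have hl : lcp (x :: as) (y :: bs) = 0 := by simp [lcp, h]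
        rw [List.zip_cons_cons]
        simp only [checkGo, if_pos (by exact h : x ≠ y)]
        rw [hl]
        rw [if_pos (by simp only [List.length_cons]; omega)]
        simp

theorem checkA_length (a b : String) :
    (checkA a b).length = min (lcp a.toList b.toList + 1) a.toList.length := by
  unfold checkA
  rw [checkGo_spec]
  by_cases hlt : lcp a.toList b.toList < min a.toList.length b.toList.length
  · rw [if_pos hlt]
    simp only [Bool.false_and, if_neg (Bool.false_ne_true), List.nil_append]
    rw [List.length_take]
  · rw [if_neg hlt]
    have hlcp : lcp a.toList b.toList = min a.toList.length b.toList.length :=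
      Nat.le_antisymm (le_min (lcp_le_left _ _) (lcp_le_right _ _)) (Nat.le_of_not_lt hlt)
    simp only [Bool.true_and, List.nil_append]
    by_cases hab : b.toList.length < a.toList.length
    · have hmin : min a.toList.length b.toList.length = b.toList.length := by omega
      have hcond : (decide ((PySem.Str.len b : Int) < (PySem.Str.len a : Int)) &&
          ((PySem.Str.len b : Int) == -1 + ((min a.toList.length b.toList.length : Nat) : Int) + 1)) = true := by
        simp only [Bool.and_eq_true, decide_eq_true_eq, beq_iff_eq, PySem.Str.len_eq, hmin]
        exact ⟨by exact_mod_cast hab, by omega⟩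
      rw [if_pos hcond]
      have hidx : (-1 + ((min a.toList.length b.toList.length : Nat) : Int) + 1) = ((b.toList.length : Nat) : Int) := by
        push_cast [hmin]; ring
      rw [hidx, PySem.List.pyGet?_natCast]
      rw [List.getElem?_eq_getElem hab]
      simp only [List.length_append, List.length_take, List.length_cons, List.length_nil]
      rw [hlcp]
      omega
    · have hcond : (decide ((PySem.Str.len b : Int) < (PySem.Str.len a : Int)) &&
          ((PySem.Str.len b : Int) == -1 + ((min a.toList.length b.toList.length : Nat) : Int) + 1)) = false := by
        simp only [Bool.and_eq_false_iff, decide_eq_false_iff_not, not_lt, PySem.Str.len_eq]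
        exact Or.inl (by exact_mod_cast Nat.le_of_not_lt hab)
      rw [if_neg (by rw [hcond]; simp)]
      rw [List.length_take, hlcp]
      omega

theorem prefix_antisymm (a b : List Char) (h1 : a <+: b) (h2 : b <+: a) : a = b :=
  h1.eq_of_length (le_antisymm h1.length_le h2.length_le)

theorem inner_getD (w : List Char) : ∀ (pre : List Char) (cnt : PySem.Dict (List Char) Int) (q : List Char),
    ((w.foldl cntStep (cnt, pre)).1).getD q 0 =
      cnt.getD q 0 + (if pre <+: q ∧ pre ≠ q ∧ q <+: pre ++ w then 1 else 0) := by
  induction w with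
  | nil =>
    intro pre cnt q
    rw [List.foldl_nil, if_neg]
    · ring
    · rintro ⟨h1, h2, h3⟩
      exact h2 (prefix_antisymm pre q h1 (by simpa using h3))
  | cons ch w' ih =>
    intro pre cnt q
    rw [List.foldl_cons]
    have hstep : cntStep (cnt, pre) ch =
        (cnt.insert (pre ++ [ch]) (cnt.getD (pre ++ [ch]) 0 + 1), pre ++ [ch]) := rfl
    rw [hstep, ih]
    rw [PySem.Dict.getD_insert]
    by_cases hq : q = pre ++ [ch]
    · rw [if_pos hq, if_neg, if_pos]
      · subst hq; ring
      · subst hq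
        refine ⟨List.prefix_append _ _, ?_, ?_⟩
        · intro hcontra
          have := congrArg List.length hcontra
          simp at this
        · have : pre ++ [ch] ++ w' = pre ++ ch :: w' := by simp
          rw [← this]
          exact List.prefix_append _ _
      · subst hq; rintro ⟨_, hne, _⟩; exact hne rfl
    · rw [if_neg hq]
      congr 1
      have hiff : (pre ++ [ch] <+: q ∧ pre ++ [ch] ≠ q ∧ q <+: pre ++ [ch] ++ w') ↔
          (pre <+: q ∧ pre ≠ q ∧ q <+: pre ++ ch :: w') := by
        constructor
        · rintro ⟨h1, _, h3⟩
          refine ⟨(List.prefix_append pre [ch]).trans h1, ?_, by simpa using h3⟩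
          intro hpq
          have := h1.length_le
          subst hpq
          simp at this
        · rintro ⟨h1, h2, h3⟩
          obtain ⟨t, rfl⟩ := h1
          have ht : t ≠ [] := by rintro rfl; simp at h2
          have h3' : t <+: ch :: w' := (List.prefix_append_right_inj pre).mp h3
          cases t with
          | nil => exact absurd rfl ht
          | cons c t' =>
            obtain ⟨rfl, ht'⟩ := List.cons_prefix_cons.mp h3'
            refine ⟨?_, fun h => hq h.symm, ?_⟩
            · have : pre ++ c :: t' = (pre ++ [c]) ++ t' := by simp
              rw [this]
              exact List.prefix_append _ _
            · have : pre ++ c :: t' = (pre ++ [c]) ++ t' := by simp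
              rw [this]
              exact (List.prefix_append_right_inj (pre ++ [c])).mpr ht'
      rw [if_congr hiff rfl rfl]

theorem cntB_aux (words : List String) : ∀ (cnt : PySem.Dict (List Char) Int) (q : List Char), q ≠ [] →
    ((words.foldl (fun cnt w => (w.toList.foldl cntStep (cnt, [])).1) cnt)).getD q 0 =
      cnt.getD q 0 + (words.countP (fun w => decide (q <+: w.toList)) : Int) := by
  induction words with
  | nil => intro cnt q _; simp
  | cons w ws ih =>
    intro cnt q hq
    rw [List.foldl_cons, ih _ q hq, inner_getD]
    rw [List.countP_cons]
    have : ([] <+: q ∧ [] ≠ q ∧ q <+: [] ++ w.toList) ↔ (q <+: w.toList) := by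
      constructor
      · rintro ⟨_, _, h3⟩; simpa using h3
      · intro h; exact ⟨List.nil_prefix, fun h' => hq h'.symm, by simpa using h⟩
    rw [if_congr this rfl rfl]
    by_cases h : q <+: w.toList
    · rw [if_pos h, if_pos (by simpa using h)]
      push_cast; ring
    · rw [if_neg h, if_neg (by simpa using h)]
      push_cast; ring

theorem cntB_getD (words : List String) (q : List Char) (hq : q ≠ []) :
    (cntB words).getD q 0 = (words.countP (fun w => decide (q <+: w.toList)) : Int) := by
  unfold cntB
  rw [cntB_aux words PySem.Dict.empty q hq]
  simp

def othersMax (words : List String) (w : String) : Nat :=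
  ((words.erase w).map (fun u => lcp w.toList u.toList)).foldr max 0

def gv (words : List String) (w : String) : Int :=
  min ((othersMax words w : Int) + 1) (w.toList.length : Int)

theorem mem_le_foldr_max (l : List Nat) (x : Nat) (h : x ∈ l) : x ≤ l.foldr max 0 := by
  induction l with
  | nil => cases h
  | cons a t ih =>
    rcases List.mem_cons.mp h with h | h
    · simp [h]
    · exact le_trans (ih h) (le_max_right _ _)

theorem foldr_max_le (l : List Nat) (t : Nat) (h : ∀ x ∈ l, x ≤ t) : l.foldr max 0 ≤ t := by
  induction l with
  | nil => simp
  | cons a s ih =>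
    simp only [List.foldr]
    exact max_le (h a (by simp)) (ih (fun x hx => h x (by simp [hx])))

theorem foldr_max_lt (l : List Nat) (d : Nat) (hd : 0 < d) (h : ∀ x ∈ l, x < d) : l.foldr max 0 < d := by
  induction l with
  | nil => simpa
  | cons a t ih =>
    simp only [List.foldr]
    exact max_lt (h a (by simp)) (ih (fun x hx => h x (by simp [hx])))

theorem othersMax_le_len (words : List String) (w : String) :
    othersMax words w ≤ w.toList.length := by
  apply foldr_max_le
  intro x hx
  obtain ⟨u, _, rfl⟩ := List.mem_map.mp hx
  exact lcp_le_left _ _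

theorem othersMax_perm (words words' : List String) (w : String) (h : words.Perm words') :
    othersMax words w = othersMax words' w := by
  unfold othersMax
  exact List.Perm.foldr_eq ((h.erase w).map _) 0

theorem gv_perm (words words' : List String) (w : String) (h : words.Perm words') :
    gv words w = gv words' w := by
  unfold gv
  rw [othersMax_perm words words' w h]

theorem cnt_one_iff (words : List String) (w : String) (hw : w ∈ words) (d : Nat)
    (h1 : 1 ≤ d) (h2 : d ≤ w.toList.length) :
    words.countP (fun u => decide (w.toList.take d <+: u.toList)) = 1 ↔ othersMax words w < d := by
  have hperm : words.Perm (w :: words.erase w) := List.perm_cons_erase hw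
  rw [List.Perm.countP_congr hperm (fun x _ => rfl)]
  have hcc : (w :: words.erase w).countP (fun u => decide (w.toList.take d <+: u.toList)) =
      (words.erase w).countP (fun u => decide (w.toList.take d <+: u.toList)) + 1 := by
    rw [List.countP_cons]
    simp [List.take_prefix]
  rw [hcc]
  constructor
  · intro h
    have h0 : (words.erase w).countP (fun u => decide (w.toList.take d <+: u.toList)) = 0 := by omega
    rw [List.countP_eq_zero] at h0
    apply foldr_max_lt _ _ h1
    intro x hx
    obtain ⟨u, hu, rfl⟩ := List.mem_map.mp hx
    have := h0 u hu
    simp only [decide_eq_true_eq] at this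
    rw [prefix_iff_le_lcp _ _ _ h2] at this
    omega
  · intro h
    have h0 : (words.erase w).countP (fun u => decide (w.toList.take d <+: u.toList)) = 0 := by
      rw [List.countP_eq_zero]
      intro u hu
      simp only [decide_eq_true_eq]
      rw [prefix_iff_le_lcp _ _ _ h2]
      intro hd
      have : lcp w.toList u.toList ≤ othersMax words w :=
        mem_le_foldr_max _ _ (List.mem_map.mpr ⟨u, hu, rfl⟩)
      omega
    omega

theorem needGo_go (words : List String) (w : String) (hw : w ∈ words) :
    ∀ (k dn : Nat), dn + k = w.toList.length → dn ≤ othersMax words w →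
    needGo (cntB words) (w.toList.length : Int) (w.toList.drop dn) (w.toList.take dn) (dn : Int) =
      min ((othersMax words w : Int) + 1) (w.toList.length : Int) := by
  intro k
  induction k with
  | zero =>
    intro dn hlen hM
    have hdn : dn = w.toList.length := by omega
    rw [List.drop_eq_nil_of_le (by omega)]
    have hMlen : othersMax words w = w.toList.length :=
      le_antisymm (othersMax_le_len words w) (hdn ▸ hM)
    simp only [needGo, hMlen]
    omega
  | succ k ih =>
    intro dn hlen hM
    have hdn : dn < w.toList.length := by omega
    rw [List.drop_eq_getElem_cons hdn]
    simp only [needGo]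
    rw [List.take_append_getElem hdn]
    have htk : (w.toList.take (dn + 1)) ≠ [] := by
      have : (w.toList.take (dn + 1)).length = dn + 1 := by
        rw [List.length_take]; omega
      intro hc; rw [hc] at this; simp at this
    rw [cntB_getD words _ htk]
    by_cases hone : words.countP (fun u => decide (w.toList.take (dn + 1) <+: u.toList)) = 1
    · have hcond : ((words.countP (fun u => decide (w.toList.take (dn + 1) <+: u.toList)) : Int) == (1 : Int)) = true := by
        simp [hone]
      rw [if_pos hcond]
      have hMlt : othersMax words w < dn + 1 :=
        (cnt_one_iff words w hw (dn + 1) (by omega) (by omega)).mp hone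
      have : othersMax words w = dn := by omega
      rw [this]
      omega
    · have hcond : ((words.countP (fun u => decide (w.toList.take (dn + 1) <+: u.toList)) : Int) == (1 : Int)) = false := by
        simpa using (fun h => hone (by exact_mod_cast h))
      rw [if_neg (by rw [hcond]; simp)]
      have hMge : dn + 1 ≤ othersMax words w := by
        by_contra hc
        exact hone ((cnt_one_iff words w hw (dn + 1) (by omega) (by omega)).mpr (by omega))
      have hcast : ((dn : Int) + 1) = ((dn + 1 : Nat) : Int) := by push_cast; ring
      rw [hcast]
      exact ih (dn + 1) (by omega) hMge

theorem needGo_spec (words : List String) (w : String) (hw : w ∈ words) :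
    needGo (cntB words) (w.toList.length : Int) w.toList [] 0 = gv words w := by
  have := needGo_go words w hw w.toList.length 0 (by omega) (Nat.zero_le _)
  simpa [gv] using this

theorem solution_alt_eq_sum (words : List String) :
    solution_alt words = (words.map (gv words)).sum := by
  have h1 : solution_alt words =
      words.foldl (fun total w => total + needGo (cntB words) (PySem.Str.len w : Int) w.toList [] 0) 0 := rfl
  rw [h1, PySem.List.foldl_add]
  have h2 : words.map (fun w => needGo (cntB words) (PySem.Str.len w : Int) w.toList [] 0) =
      words.map (gv words) := by
    apply List.map_congr_left
    intro w hw
    have hlen : (PySem.Str.len w : Int) = (w.toList.length : Int) := by simp [pysem]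
    rw [hlen]
    exact needGo_spec words w hw
  rw [h2]
  simp

-- the value A adds at loop index i (the three position branches)
def gA (s : List String) (i : Int) : Int :=
  if i == 0 then
    ((checkA (PySem.List.pyGetD s i "") (PySem.List.pyGetD s (i + 1) "")).length : Int)
  else if i == (s.length : Int) - 1 then
    ((checkA (PySem.List.pyGetD s i "") (PySem.List.pyGetD s (i - 1) "")).length : Int)
  else
    max ((checkA (PySem.List.pyGetD s i "") (PySem.List.pyGetD s (i - 1) "")).length : Int)
        ((checkA (PySem.List.pyGetD s i "") (PySem.List.pyGetD s (i + 1) "")).length : Int)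

theorem erase_perm_eraseIdx (s : List String) (j : Nat) (hj : j < s.length) :
    (s.erase s[j]).Perm (s.eraseIdx j) := by
  have hpj : (s[j] :: s.eraseIdx j).Perm s := List.getElem_cons_eraseIdx_perm hj
  have hpe : s.Perm (s[j] :: s.erase s[j]) := List.perm_cons_erase (List.getElem_mem hj)
  exact List.Perm.cons_inv (hpe.symm.trans hpj.symm)

theorem getElem_mem_erase (s : List String) (j k : Nat) (hj : j < s.length) (hk : k < s.length)
    (hne : k ≠ j) : s[k] ∈ s.erase s[j] := by
  rw [(erase_perm_eraseIdx s j hj).mem_iff]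
  rcases Nat.lt_or_ge k j with h | h
  · have hk' : k < (s.eraseIdx j).length := by rw [List.length_eraseIdx]; split <;> omega
    have : (s.eraseIdx j)[k] = s[k] := by rw [List.getElem_eraseIdx]; simp [h]
    exact this ▸ List.getElem_mem hk'
  · have hkj : j < k := by omega
    have hk' : k - 1 < (s.eraseIdx j).length := by rw [List.length_eraseIdx]; split <;> omega
    have : (s.eraseIdx j)[k - 1] = s[k] := by
      rw [List.getElem_eraseIdx]
      split
      · omega
      · congr 1; omega
    exact this ▸ List.getElem_mem hk'

theorem mem_erase_index (s : List String) (j : Nat) (hj : j < s.length) (u : String)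
    (hu : u ∈ s.erase s[j]) : ∃ k, ∃ hk : k < s.length, k ≠ j ∧ s[k] = u := by
  rw [(erase_perm_eraseIdx s j hj).mem_iff] at hu
  obtain ⟨m, hm, hmu⟩ := List.mem_iff_getElem.mp hu
  have hlen : (s.eraseIdx j).length = s.length - 1 := by rw [List.length_eraseIdx]; split <;> omega
  rw [List.getElem_eraseIdx] at hmu
  split at hmu
  · exact ⟨m, by omega, by omega, hmu⟩
  · exact ⟨m + 1, by omega, by omega, hmu⟩

theorem bound_left (s : List String)
    (hmono : ∀ p q (hpq : p ≤ q) (hq : q < s.length), s[p]'(lt_of_le_of_lt hpq hq) ≤ s[q])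
    (j k : Nat) (hk : k < j) (hj : j < s.length) :
    lcp (s[j]).toList (s[k]'(by omega)).toList ≤
      lcp (s[j]).toList (s[j-1]'(by omega)).toList := by
  have h1 : s[k]'(by omega) ≤ s[j-1]'(by omega) := hmono k (j-1) (by omega) (by omega)
  have h2 : s[j-1]'(by omega) ≤ s[j] := hmono (j-1) j (by omega) hj
  exact lcp_between_left _ _ _ (String.le_iff_toList_le.mp h1) (String.le_iff_toList_le.mp h2)

theorem bound_right (s : List String)
    (hmono : ∀ p q (hpq : p ≤ q) (hq : q < s.length), s[p]'(lt_of_le_of_lt hpq hq) ≤ s[q])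
    (j k : Nat) (hjk : j < k) (hk : k < s.length) :
    lcp (s[j]'(by omega)).toList (s[k]).toList ≤
      lcp (s[j]'(by omega)).toList (s[j+1]'(by omega)).toList := by
  have h1 : s[j]'(by omega) ≤ s[j+1]'(by omega) := hmono j (j+1) (by omega) (by omega)
  have h2 : s[j+1]'(by omega) ≤ s[k] := hmono (j+1) k (by omega) hk
  exact lcp_between_right _ _ _ (String.le_iff_toList_le.mp h1) (String.le_iff_toList_le.mp h2)

theorem othersMax_first (s : List String)
    (hmono : ∀ p q (hpq : p ≤ q) (hq : q < s.length), s[p]'(lt_of_le_of_lt hpq hq) ≤ s[q])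
    (h2 : 2 ≤ s.length) :
    othersMax s (s[0]'(by omega)) = lcp (s[0]'(by omega)).toList (s[1]'(by omega)).toList := by
  apply le_antisymm
  · apply foldr_max_le
    intro x hx
    obtain ⟨u, hu, rfl⟩ := List.mem_map.mp hx
    obtain ⟨k, hk, hkne, rfl⟩ := mem_erase_index s 0 (by omega) u hu
    exact bound_right s hmono 0 k (by omega) hk
  · exact mem_le_foldr_max _ _ (List.mem_map.mpr
      ⟨s[1]'(by omega), getElem_mem_erase s 0 1 (by omega) (by omega) (by omega), rfl⟩)

theorem othersMax_last (s : List String)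
    (hmono : ∀ p q (hpq : p ≤ q) (hq : q < s.length), s[p]'(lt_of_le_of_lt hpq hq) ≤ s[q])
    (h2 : 2 ≤ s.length) :
    othersMax s (s[s.length-1]'(by omega)) =
      lcp (s[s.length-1]'(by omega)).toList (s[s.length-1-1]'(by omega)).toList := by
  apply le_antisymm
  · apply foldr_max_le
    intro x hx
    obtain ⟨u, hu, rfl⟩ := List.mem_map.mp hx
    obtain ⟨k, hk, hkne, rfl⟩ := mem_erase_index s (s.length-1) (by omega) u hu
    exact bound_left s hmono (s.length-1) k (by omega) (by omega)
  · exact mem_le_foldr_max _ _ (List.mem_map.mpr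
      ⟨s[s.length-1-1]'(by omega),
        getElem_mem_erase s (s.length-1) (s.length-1-1) (by omega) (by omega) (by omega), rfl⟩)

theorem othersMax_mid (s : List String)
    (hmono : ∀ p q (hpq : p ≤ q) (hq : q < s.length), s[p]'(lt_of_le_of_lt hpq hq) ≤ s[q])
    (j : Nat) (hj1 : 1 ≤ j) (hj2 : j + 1 < s.length) :
    othersMax s (s[j]'(by omega)) =
      max (lcp (s[j]'(by omega)).toList (s[j-1]'(by omega)).toList)
          (lcp (s[j]'(by omega)).toList (s[j+1]'(by omega)).toList) := by
  apply le_antisymm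
  · apply foldr_max_le
    intro x hx
    obtain ⟨u, hu, rfl⟩ := List.mem_map.mp hx
    obtain ⟨k, hk, hkne, rfl⟩ := mem_erase_index s j (by omega) u hu
    rcases Nat.lt_or_ge k j with h | h
    · exact le_max_of_le_left (bound_left s hmono j k h (by omega))
    · exact le_max_of_le_right (bound_right s hmono j k (by omega) hk)
  · apply max_le
    · exact mem_le_foldr_max _ _ (List.mem_map.mpr
        ⟨s[j-1]'(by omega), getElem_mem_erase s j (j-1) (by omega) (by omega) (by omega), rfl⟩)
    · exact mem_le_foldr_max _ _ (List.mem_map.mpr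
        ⟨s[j+1]'(by omega), getElem_mem_erase s j (j+1) (by omega) (by omega) (by omega), rfl⟩)

theorem gA_eq (s : List String)
    (hmono : ∀ p q (hpq : p ≤ q) (hq : q < s.length), s[p]'(lt_of_le_of_lt hpq hq) ≤ s[q])
    (h2 : 2 ≤ s.length) (j : Nat) (hj : j < s.length) :
    gA s (j : Int) = gv s (s[j]) := by
  have hadd : (j : Int) + 1 = ((j + 1 : Nat) : Int) := by push_cast; ring
  by_cases hj0 : j = 0
  · have hc1 : ((j : Int) == 0) = true := beq_iff_eq.mpr (by exact_mod_cast hj0)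
    rw [gA, if_pos hc1, hadd, PySem.List.pyGetD_natCast, PySem.List.pyGetD_natCast,
      List.getD_eq_getElem s "" hj, List.getD_eq_getElem s "" (by omega : j + 1 < s.length),
      checkA_length]
    subst hj0
    rw [gv, othersMax_first s hmono h2]
    have : s[0+1]'(by omega) = s[1]'(by omega) := by simp
    rw [this]
    push_cast [Nat.cast_min]
    rfl
  · by_cases hjl : j = s.length - 1
    · have hc1 : ((j : Int) == 0) = false := by
        simp only [beq_eq_false_iff_ne, ne_eq]
        exact_mod_cast hj0
      have hc2 : ((j : Int) == (s.length : Int) - 1) = true := beq_iff_eq.mpr (by omega)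
      have hsub : (j : Int) - 1 = ((j - 1 : Nat) : Int) := by omega
      rw [gA, if_neg (by rw [hc1]; simp), if_pos hc2, hsub,
        PySem.List.pyGetD_natCast, PySem.List.pyGetD_natCast,
        List.getD_eq_getElem s "" hj, List.getD_eq_getElem s "" (by omega : j - 1 < s.length),
        checkA_length]
      rw [gv]
      have hM : othersMax s (s[j]) = lcp (s[j]).toList ((s[j-1]'(by omega)).toList) := by
        have := othersMax_last s hmono h2
        have hj' : s[s.length-1]'(by omega) = s[j] := by congr 1; omega
        have hj'' : s[s.length-1-1]'(by omega) = s[j-1]'(by omega) := by congr 1; omega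
        rw [hj', hj''] at this
        exact this
      rw [hM]
      push_cast [Nat.cast_min]
      rfl
    · have hc1 : ((j : Int) == 0) = false := by
        simp only [beq_eq_false_iff_ne, ne_eq]
        exact_mod_cast hj0
      have hc2 : ((j : Int) == (s.length : Int) - 1) = false := by
        simp only [beq_eq_false_iff_ne, ne_eq]
        omega
      have hsub : (j : Int) - 1 = ((j - 1 : Nat) : Int) := by omega
      rw [gA, if_neg (by rw [hc1]; simp), if_neg (by rw [hc2]; simp), hadd, hsub,
        PySem.List.pyGetD_natCast, PySem.List.pyGetD_natCast, PySem.List.pyGetD_natCast,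
        List.getD_eq_getElem s "" hj, List.getD_eq_getElem s "" (by omega : j - 1 < s.length),
        List.getD_eq_getElem s "" (by omega : j + 1 < s.length),
        checkA_length, checkA_length]
      rw [gv, othersMax_mid s hmono j (by omega) (by omega)]
      push_cast [Nat.cast_min, Nat.cast_max]
      omega

theorem map_range_getD (l : List String) (f : String → Int) :
    (List.range l.length).map (fun j => f (l.getD j "")) = l.map f := by
  apply List.ext_getElem
  · simp
  · intro i h1 h2
    simp only [List.getElem_map, List.getElem_range]
    rw [List.getD_eq_getElem l "" (by simpa using h2)]

theorem solution_eq_sum (words : List String) (h : words.length ≠ 1) :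
    solution words = (words.map (gv words)).sum := by
  have hslen : (PySem.List.sorted words (fun x => x) false).length = words.length :=
    PySem.List.length_sorted words (fun x => x) false
  have hbody : solution words =
      (PySem.List.pyRange 0 ((PySem.List.sorted words (fun x => x) false).length : Int) 1).foldl
        (fun acc i => acc + gA (PySem.List.sorted words (fun x => x) false) i) 0 := by
    rw [solution]
    apply PySem.List.foldl_congr_mem
    intro acc i _
    rw [gA]
    split_ifs <;> rfl
  rw [hbody, PySem.List.foldl_add, PySem.List.pyRange_zero_natCast, List.map_map]
  rcases Nat.eq_zero_or_pos words.length with hz | hpos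
  · have hw : words = [] := List.length_eq_zero_iff.mp hz
    subst hw
    simp [hslen]
  · have h2 : 2 ≤ (PySem.List.sorted words (fun x => x) false).length := by omega
    have hmono : ∀ p q (hpq : p ≤ q) (hq : q < (PySem.List.sorted words (fun x => x) false).length),
        (PySem.List.sorted words (fun x => x) false)[p]'(lt_of_le_of_lt hpq hq) ≤
          (PySem.List.sorted words (fun x => x) false)[q] :=
      fun p q hpq hq => PySem.List.sorted_id_getElem_mono words hpq hq
    have hmap : (List.range (PySem.List.sorted words (fun x => x) false).length).map
          ((gA (PySem.List.sorted words (fun x => x) false)) ∘ (fun k : Nat => (k : Int))) =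
        (List.range (PySem.List.sorted words (fun x => x) false).length).map
          (fun j => gv (PySem.List.sorted words (fun x => x) false)
            ((PySem.List.sorted words (fun x => x) false).getD j "")) := by
      apply List.map_congr_left
      intro j hjr
      have hj : j < (PySem.List.sorted words (fun x => x) false).length := List.mem_range.mp hjr
      simp only [Function.comp]
      rw [gA_eq _ hmono h2 j hj, List.getD_eq_getElem _ "" hj]
    rw [hmap, map_range_getD]
    have hperm : (PySem.List.sorted words (fun x => x) false).Perm words :=
      PySem.List.sorted_perm words (fun x => x) false
    have hgv : (PySem.List.sorted words (fun x => x) false).map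
          (gv (PySem.List.sorted words (fun x => x) false)) =
        (PySem.List.sorted words (fun x => x) false).map (gv words) :=
      List.map_congr_left (fun w _ => gv_perm _ words w hperm)
    rw [hgv]
    rw [List.Perm.sum_eq (hperm.map (gv words))]
    simp


-- ===== VERDICT (by name: the statement is the Claim_ definition above) =====
theorem solution_spec : Claim_equal_solution := by
  intro words _ hpre
  unfold Spec_solution
  rw [solution_eq_sum words hpre, solution_alt_eq_sum words]
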